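-- pv_equiv track=rewrite | github.com/s2css-uniovi/bearing-fdd | src/backend/enter_utils.py | checkStage
-- ===== SOURCE A (Python) =====
-- def checkStage(HI_analyzed_samples, threshold):
--     counter = 0
--     faulty = False
--     bk = None
--     for index, elem in enumerate(HI_analyzed_samples):
--         if elem >= threshold:
--             counter = counter + 1
--             if counter >= 5:
--                 bk = index
--                 faulty = True
--                 break
--         else:
--             counter = 0
--     return faulty, bk
-- ===== SOURCE B (Python) =====
-- def checkStage(HI_analyzed_samples, threshold):
--     # Partition into maximal runs of consecutive same-side elements;
--     # a qualifying run (>= threshold, length >= 5) triggers at its 5th element.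
--     xs = HI_analyzed_samples
--     n = len(xs)
--     i = 0
--     while i < n:
--         key = xs[i] >= threshold
--         j = i + 1
--         while j < n and (xs[j] >= threshold) == key:
--             j += 1
--         if key and j - i >= 5:
--             return True, i + 4
--         i = j
--     return False, None
-- ===== Notes on version B (the rewrite author's own statement) =====
-- stated objective: alternative
-- what changed: B partitions the input into maximal runs of consecutive elements on the same side of the threshold and returns run-start+4 for the first above-threshold run of length >= 5, instead of A's element-wise pass with a reset counter.
import Mathlib
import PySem

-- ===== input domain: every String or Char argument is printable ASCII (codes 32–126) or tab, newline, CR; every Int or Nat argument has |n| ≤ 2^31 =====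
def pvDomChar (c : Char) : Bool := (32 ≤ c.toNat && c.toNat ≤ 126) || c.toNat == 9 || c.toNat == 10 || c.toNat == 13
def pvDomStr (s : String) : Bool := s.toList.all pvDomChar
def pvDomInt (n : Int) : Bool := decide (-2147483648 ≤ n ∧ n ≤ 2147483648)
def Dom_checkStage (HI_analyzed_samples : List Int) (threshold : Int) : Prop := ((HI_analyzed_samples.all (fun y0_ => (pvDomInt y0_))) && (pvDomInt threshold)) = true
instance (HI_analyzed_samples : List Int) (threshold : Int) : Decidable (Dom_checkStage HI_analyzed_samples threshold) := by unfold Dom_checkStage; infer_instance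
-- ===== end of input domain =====

-- B replaces A's element-wise counter pass by a partition into maximal same-side runs
-- (alternative decomposition, same O(n) cost); return values proved equal on all inputs.


-- ===== PORT A =====
-- A's loop: state (counter); break returns (True, index); falling off returns (False, None).
def checkStageAux (threshold : Int) : List Int → Int → Int → Bool × Option Int
  | [], _, _ => (false, none)
  | elem :: rest, index, counter =>
    if elem ≥ threshold then
      if counter + 1 ≥ 5 then (true, some index)
      else checkStageAux threshold rest (index + 1) (counter + 1)
    else checkStageAux threshold rest (index + 1) 0

def checkStage (HI_analyzed_samples : List Int) (threshold : Int) : Bool × Option Int :=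
  checkStageAux threshold HI_analyzed_samples 0 0

-- ===== PORT B =====
-- takeRun = B's inner while loop: length of the maximal run with key k, and the remainder.
def takeRun (t : Int) (k : Bool) : List Int → Nat × List Int
  | [] => (0, [])
  | x :: xs =>
    if decide (x ≥ t) = k then
      let r := takeRun t k xs
      (r.1 + 1, r.2)
    else (0, x :: xs)

theorem takeRun_len_le (t : Int) (k : Bool) : ∀ l : List Int, (takeRun t k l).2.length ≤ l.length := by
  intro l
  induction l with
  | nil => simp [takeRun]
  | cons x xs ih =>
    simp only [takeRun]
    split
    · simpa using Nat.le_succ_of_le ih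
    · simp

-- scanGroups = B's outer while loop: i is the absolute start index of the current run.
def scanGroups (t : Int) : List Int → Int → Bool × Option Int
  | [], _ => (false, none)
  | x :: xs, i =>
    let k := decide (x ≥ t)
    let r := takeRun t k xs
    if k && decide ((r.1 : Int) + 1 ≥ 5) then (true, some (i + 4))
    else scanGroups t r.2 (i + ((r.1 : Int) + 1))
termination_by l => l.length
decreasing_by exact Nat.lt_succ_of_le (takeRun_len_le t (decide (x ≥ t)) xs)

def checkStage_alt (HI_analyzed_samples : List Int) (threshold : Int) : Bool × Option Int :=
  scanGroups threshold HI_analyzed_samples 0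

-- ===== PRECONDITION & SPEC =====
def Spec_checkStage (HI_analyzed_samples : List Int) (threshold : Int) (out : Bool × Option Int) : Prop := out = checkStage_alt HI_analyzed_samples threshold
instance (HI_analyzed_samples : List Int) (threshold : Int) (out : Bool × Option Int) : Decidable (Spec_checkStage HI_analyzed_samples threshold out) := by unfold Spec_checkStage; infer_instance

-- ===== CLAIM (what is proved, stated in full; the proofs are below) =====
def Claim_equal_checkStage : Prop := ∀ (HI_analyzed_samples : List Int) (threshold : Int), Dom_checkStage HI_analyzed_samples threshold → Spec_checkStage HI_analyzed_samples threshold (checkStage HI_analyzed_samples threshold)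

-- ===== LEMMAS AND PROOFS =====

-- Walking a false run: the counter stays 0.
theorem aux_false_run (t : Int) : ∀ (l : List Int) (i : Int),
    checkStageAux t l i 0 = checkStageAux t (takeRun t false l).2 (i + ((takeRun t false l).1 : Int)) 0 := by
  intro l
  induction l with
  | nil => intro i; simp [takeRun]
  | cons x xs ih =>
    intro i
    by_cases hx : x ≥ t
    · simp [takeRun, hx, checkStageAux]
    · simp only [takeRun, decide_eq_false hx, reduceIte, checkStageAux, if_neg hx]
      rw [ih (i + 1)]
      congr 1
      push_cast
      ring

-- Walking a true run that cannot reach the break: counter accumulates the run length.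
theorem aux_true_run_short (t : Int) : ∀ (l : List Int) (i c : Int),
    c + ((takeRun t true l).1 : Int) < 5 →
    checkStageAux t l i c = checkStageAux t (takeRun t true l).2 (i + ((takeRun t true l).1 : Int)) (c + ((takeRun t true l).1 : Int)) := by
  intro l
  induction l with
  | nil => intro i c _; simp [takeRun]
  | cons x xs ih =>
    intro i c h
    by_cases hx : x ≥ t
    · simp only [takeRun, decide_eq_true hx, reduceIte] at h ⊢
      have hn : ¬ (c + 1 ≥ 5) := by push_cast at h; omega
      simp only [checkStageAux, if_pos hx, if_neg hn]
      have h' : (c + 1) + ((takeRun t true xs).1 : Int) < 5 := by push_cast at h; omega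
      rw [ih (i + 1) (c + 1) h']
      rw [show i + 1 + ((takeRun t true xs).1 : Int) = i + (((takeRun t true xs).1 : Int) + 1) from by ring,
          show c + 1 + ((takeRun t true xs).1 : Int) = c + (((takeRun t true xs).1 : Int) + 1) from by ring]
      push_cast
      rfl
    · simp [takeRun, hx]

-- Walking a true run that reaches the break: returns at the (5 - c)-th element of the run.
theorem aux_true_run_break (t : Int) : ∀ (l : List Int) (i c : Int),
    0 ≤ c → c < 5 → c + ((takeRun t true l).1 : Int) ≥ 5 →
    checkStageAux t l i c = (true, some (i + (4 - c))) := by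
  intro l
  induction l with
  | nil => intro i c _ _ h; simp [takeRun] at h; omega
  | cons x xs ih =>
    intro i c hc0 hc5 h
    by_cases hx : x ≥ t
    · simp only [takeRun, decide_eq_true hx, reduceIte] at h
      by_cases hb : c + 1 ≥ 5
      · have : c = 4 := by omega
        subst this
        simp [checkStageAux, hx]
      · simp only [checkStageAux, if_pos hx, if_neg hb]
        have h' : (c + 1) + ((takeRun t true xs).1 : Int) ≥ 5 := by push_cast at h; omega
        rw [ih (i + 1) (c + 1) (by omega) (by omega) h']
        simp only [Prod.mk.injEq, Option.some.injEq, true_and]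
        omega
    · simp only [takeRun] at h
      rw [if_neg (show ¬ (decide (x ≥ t) = true) from by simp [hx])] at h
      simp at h; omega

-- The remainder of a run starts (if nonempty) with an element failing the run's key.
theorem takeRun_rest_head (t : Int) (k : Bool) : ∀ (l : List Int) (y : Int) (ys : List Int),
    (takeRun t k l).2 = y :: ys → decide (y ≥ t) ≠ k := by
  intro l
  induction l with
  | nil => intro y ys h; simp [takeRun] at h
  | cons x xs ih =>
    intro y ys h
    by_cases hx : decide (x ≥ t) = k
    · simp only [takeRun, if_pos hx] at h
      exact ih y ys h
    · simp only [takeRun, if_neg hx] at h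
      cases h; exact hx

-- Main invariant: A's scan with counter 0 equals B's run scan from the same index.
theorem aux_eq_scan (t : Int) : ∀ (l : List Int) (i : Int),
    checkStageAux t l i 0 = scanGroups t l i := by
  intro l
  induction hl : l.length using Nat.strong_induction_on generalizing l with
  | _ n ih =>
    cases l with
    | nil => intro i; simp [checkStageAux, scanGroups]
    | cons x xs =>
      intro i
      by_cases hx : x ≥ t
      · rw [scanGroups]
        simp only [decide_eq_true hx]
        by_cases hlong : ((takeRun t true xs).1 : Int) + 1 ≥ 5
        · simp only [checkStageAux, if_pos hx, if_neg (by omega : ¬ ((0:Int) + 1 ≥ 5))]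
          rw [show (0:Int) + 1 = 1 from by norm_num]
          rw [aux_true_run_break t xs (i+1) 1 (by omega) (by omega) (by omega)]
          simp only [Bool.true_and, if_pos (decide_eq_true hlong)]
          simp only [Prod.mk.injEq, Option.some.injEq, true_and]
          omega
        · simp only [Bool.true_and, if_neg (show ¬ (decide (((takeRun t true xs).1 : Int) + 1 ≥ 5)) = true from by
            simp only [decide_eq_true_eq]; exact hlong)]
          simp only [checkStageAux, if_pos hx, if_neg (by omega : ¬ ((0:Int) + 1 ≥ 5))]
          rw [show (0:Int) + 1 = 1 from by norm_num]
          have hshort : (1 : Int) + ((takeRun t true xs).1 : Int) < 5 := by omega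
          rw [aux_true_run_short t xs (i+1) 1 hshort]
          have hlen : (takeRun t true xs).2.length ≤ xs.length := takeRun_len_le t true xs
          -- after the short true run the remainder is [] or starts below threshold: counter resets
          have hreset : checkStageAux t (takeRun t true xs).2 (i + 1 + ((takeRun t true xs).1 : Int)) (1 + ((takeRun t true xs).1 : Int))
              = checkStageAux t (takeRun t true xs).2 (i + 1 + ((takeRun t true xs).1 : Int)) 0 := by
            cases hrest2 : (takeRun t true xs).2 with
            | nil => simp [checkStageAux]
            | cons y ys =>
              have hy : ¬ (y ≥ t) := by
                have := takeRun_rest_head t true xs y ys hrest2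
                simpa using this
              simp [checkStageAux, if_neg hy]
          rw [hreset]
          rw [ih (takeRun t true xs).2.length (by subst hl; simp; omega) _ rfl]
          congr 1
          ring
      · rw [scanGroups]
        simp only [decide_eq_false hx, Bool.false_and, Bool.false_eq_true, if_false]
        simp only [checkStageAux, if_neg hx]
        have hlen := takeRun_len_le t false xs
        rw [aux_false_run t xs (i+1)]
        rw [ih (takeRun t false xs).2.length (by subst hl; simp; omega) _ rfl]
        congr 1
        ring

-- ===== VERDICT (by name: the statement is the Claim_ definition above) =====
theorem checkStage_spec : Claim_equal_checkStage := by
  intro l t _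
  unfold Spec_checkStage checkStage checkStage_alt
  exact aux_eq_scan t l 0
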